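-- pv_equiv track=rewrite | github.com/wsher0901/Weekly_Meeting_Dashboard_Visualization | Functions/Visualization/New_Allele_Visualization.py | check_ars
-- ===== SOURCE A (Python) =====
-- def check_ars(gene,mut_list):
--     area_set = set([x for x in mut_list if x[0] == 'E'])
--     temp = [0,0]
--     if gene in ['A','B','C']:
--         if len(area_set) != 0:
--             if 'E2' in area_set or 'E3' in area_set:
--                 temp[0] = 1
--
--             if len(area_set.difference(set(['E2','E3']))) > 0:
--                 temp[1] = 1
--     else:
--         if len(area_set) != 0:
--             if 'E2' in area_set:
--                 temp[0] = 1
--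
--             if len(area_set.difference(set(['E2']))) > 0:
--                 temp[1] = 1
--
--     if temp == [1,1]:
--         return 'Both'
--     elif temp == [1,0]:
--         return 'ARS'
--     else:
--         return 'Non-ARS'
-- ===== SOURCE B (Python) =====
-- def check_ars(gene, mut_list):
--     markers = {'E2', 'E3'} if gene in ('A', 'B', 'C') else {'E2'}
--     has_ars = False
--     has_other = False
--     for x in mut_list:
--         if x[0] == 'E':
--             if x in markers:
--                 has_ars = True
--             else:
--                 has_other = True
--     if has_ars and has_other:
--         return 'Both'
--     if has_ars:
--         return 'ARS'
--     return 'Non-ARS'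
-- ===== Notes on version B (the rewrite author's own statement) =====
-- stated objective: simpler
-- what changed: Picks the ARS marker set once from the gene, then classifies in a single scan with two boolean flags, instead of building a set and running separate membership and set-difference passes in a duplicated if/else.
import Mathlib
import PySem

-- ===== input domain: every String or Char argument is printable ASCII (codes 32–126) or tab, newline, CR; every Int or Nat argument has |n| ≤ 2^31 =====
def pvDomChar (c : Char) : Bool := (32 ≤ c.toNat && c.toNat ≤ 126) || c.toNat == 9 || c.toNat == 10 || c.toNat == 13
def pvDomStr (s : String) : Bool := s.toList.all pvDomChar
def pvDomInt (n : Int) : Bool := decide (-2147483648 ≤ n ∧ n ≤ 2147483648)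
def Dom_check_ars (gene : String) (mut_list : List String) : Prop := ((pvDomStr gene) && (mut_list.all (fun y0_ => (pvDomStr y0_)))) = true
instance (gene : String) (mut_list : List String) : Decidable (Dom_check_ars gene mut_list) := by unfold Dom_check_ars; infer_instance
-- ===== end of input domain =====

-- B picks the marker set once from the gene and classifies in one flagged scan, replacing A's
-- set-build plus membership/difference passes duplicated across the gene branches (objective: simpler).


-- ===== PORT A =====
-- x[0] == 'E' : PySem.Str.pyGet? is exact (none = IndexError on the empty string; excluded by Pre_)
def check_ars (gene : String) (mut_list : List String) : String :=
  let area_set : PySem.Set String :=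
    PySem.Set.ofList (mut_list.filter (fun x => PySem.Str.pyGet? x 0 == some 'E'))
  let temp : Int × Int :=
    if gene ∈ ["A", "B", "C"] then
      if PySem.Set.len area_set ≠ 0 then
        ((if PySem.Set.contains area_set "E2" || PySem.Set.contains area_set "E3" then 1 else 0),
         (if PySem.Set.len (PySem.Set.diff area_set (PySem.Set.ofList ["E2", "E3"])) > 0 then 1 else 0))
      else (0, 0)
    else
      if PySem.Set.len area_set ≠ 0 then
        ((if PySem.Set.contains area_set "E2" then 1 else 0),
         (if PySem.Set.len (PySem.Set.diff area_set (PySem.Set.ofList ["E2"])) > 0 then 1 else 0))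
      else (0, 0)
  if temp = (1, 1) then "Both" else if temp = (1, 0) then "ARS" else "Non-ARS"

-- ===== PORT B =====
def check_ars_alt (gene : String) (mut_list : List String) : String :=
  let markers : PySem.Set String :=
    if gene ∈ ["A", "B", "C"] then PySem.Set.ofList ["E2", "E3"] else PySem.Set.ofList ["E2"]
  let flags : Bool × Bool :=
    mut_list.foldl (fun f x =>
      if PySem.Str.pyGet? x 0 == some 'E' then
        if PySem.Set.contains markers x then (true, f.2) else (f.1, true)
      else f) (false, false)
  if flags.1 && flags.2 then "Both" else if flags.1 then "ARS" else "Non-ARS"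

-- ===== PRECONDITION & SPEC =====
-- Pre_ excludes lists containing an empty string, on which Python A raises IndexError (x[0]).
def Pre_check_ars (gene : String) (mut_list : List String) : Prop := ∀ x ∈ mut_list, x ≠ ""
instance (gene : String) (mut_list : List String) : Decidable (Pre_check_ars gene mut_list) := by unfold Pre_check_ars; infer_instance
def pvWitness_check_ars : String × List String := ("A", ["E2", "X1"])

def Spec_check_ars (gene : String) (mut_list : List String) (out : String) : Prop := out = check_ars_alt gene mut_list
instance (gene : String) (mut_list : List String) (out : String) : Decidable (Spec_check_ars gene mut_list out) := by unfold Spec_check_ars; infer_instance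

-- ===== CLAIM (what is proved, stated in full; the proofs are below) =====
def Claim_equal_check_ars : Prop := ∀ (gene : String) (mut_list : List String), Dom_check_ars gene mut_list → Pre_check_ars gene mut_list → Spec_check_ars gene mut_list (check_ars gene mut_list)

-- ===== LEMMAS AND PROOFS =====

-- B's loop computes, for any marker set s, whether some E-mutation is in s and whether some is outside s.
theorem flags_fold_eq (s : PySem.Set String) :
    ∀ (l : List String) (a b : Bool),
      l.foldl (fun f x =>
        if PySem.Str.pyGet? x 0 == some 'E' then
          if PySem.Set.contains s x then (true, f.2) else (f.1, true)
        else f) (a, b)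
      = (a || l.any (fun x => (PySem.Str.pyGet? x 0 == some 'E') && PySem.Set.contains s x),
         b || l.any (fun x => (PySem.Str.pyGet? x 0 == some 'E') && !PySem.Set.contains s x)) := by
  intro l
  induction l with
  | nil => simp
  | cons x t ih =>
    intro a b
    simp only [List.foldl_cons, List.any_cons]
    by_cases hp : (PySem.Str.pyGet? x 0 == some 'E') = true
    · rw [if_pos hp]
      have hp' : PySem.List.pyGet? x.toList 0 = some 'E' := by simpa using hp
      by_cases hc : PySem.Set.contains s x = true
      · rw [if_pos hc, ih]
        have hc' : x ∈ s := by simpa [PySem.Set.contains] using hc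
        cases a <;> cases b <;> simp [hp', hc']
      · rw [if_neg hc, ih]
        have hc' : x ∉ s := by simpa [PySem.Set.contains] using hc
        cases a <;> cases b <;> simp [hp', hc']
    · rw [if_neg hp]
      rw [ih]
      have hp' : ¬ PySem.List.pyGet? x.toList 0 = some 'E' := by simpa using hp
      cases a <;> cases b <;> simp [hp']

theorem contains_ofList_eq (L : List String) (v : String) :
    PySem.Set.contains (PySem.Set.ofList L) v = L.contains v := by
  cases h : L.contains v
  · simp only [PySem.Set.contains]
    simp only [List.contains_eq_mem, decide_eq_false_iff_not] at h ⊢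
    simpa [PySem.Set.mem_ofList] using h
  · simp only [PySem.Set.contains]
    simp only [List.contains_eq_mem, decide_eq_true_eq] at h ⊢
    simpa [PySem.Set.mem_ofList] using h

theorem len_ofList_ne_zero_iff (L : List String) :
    PySem.Set.len (PySem.Set.ofList L) ≠ 0 ↔ L ≠ [] := by
  have h : (PySem.Set.ofList L = []) ↔ L = [] := by
    simp [List.eq_nil_iff_forall_not_mem, PySem.Set.mem_ofList]
  simp [PySem.Set.len, List.length_eq_zero_iff, h]

theorem len_diff_pos_iff (L T : List String) :
    PySem.Set.len (PySem.Set.diff (PySem.Set.ofList L) T) > 0 ↔ ∃ x ∈ L, ¬ (T.contains x = true) := by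
  simp [PySem.Set.len, PySem.Set.diff, List.length_pos_iff_exists_mem, List.mem_filter,
    PySem.Set.mem_ofList, PySem.Set.contains]

-- ===== VERDICT (by name: the statement is the Claim_ definition above) =====
theorem check_ars_spec : Claim_equal_check_ars := by
  intro gene mut_list _hdom _hpre
  unfold Spec_check_ars check_ars check_ars_alt
  simp only [flags_fold_eq, Bool.false_or]
  rw [show (mut_list.any fun x => (PySem.Str.pyGet? x 0 == some 'E') &&
        PySem.Set.contains (if gene ∈ ["A","B","C"] then PySem.Set.ofList ["E2","E3"] else PySem.Set.ofList ["E2"]) x)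
      = (mut_list.filter (fun x => PySem.Str.pyGet? x 0 == some 'E')).any
          (fun x => PySem.Set.contains (if gene ∈ ["A","B","C"] then PySem.Set.ofList ["E2","E3"] else PySem.Set.ofList ["E2"]) x)
    from (List.any_filter).symm]
  rw [show (mut_list.any fun x => (PySem.Str.pyGet? x 0 == some 'E') &&
        !PySem.Set.contains (if gene ∈ ["A","B","C"] then PySem.Set.ofList ["E2","E3"] else PySem.Set.ofList ["E2"]) x)
      = (mut_list.filter (fun x => PySem.Str.pyGet? x 0 == some 'E')).any
          (fun x => !PySem.Set.contains (if gene ∈ ["A","B","C"] then PySem.Set.ofList ["E2","E3"] else PySem.Set.ofList ["E2"]) x)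
    from (List.any_filter).symm]
  set L := mut_list.filter (fun x => PySem.Str.pyGet? x 0 == some 'E') with hLdef
  clear hLdef
  by_cases hg : gene ∈ ["A", "B", "C"] <;> simp only [hg, if_true, if_false]
  · by_cases hL : L = []
    · simp [hL]
    · rw [if_pos ((len_ofList_ne_zero_iff L).mpr hL)]
      have h1 : (PySem.Set.contains (PySem.Set.ofList L) "E2" || PySem.Set.contains (PySem.Set.ofList L) "E3")
          = L.any (fun x => PySem.Set.contains (PySem.Set.ofList ["E2", "E3"]) x) := by
        rw [contains_ofList_eq, contains_ofList_eq]
        apply Bool.eq_iff_iff.mpr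
        simp only [Bool.or_eq_true, List.contains_eq_mem, decide_eq_true_eq, List.any_eq_true,
          PySem.Set.contains, PySem.Set.mem_ofList]
        constructor
        · rintro (h | h)
          · exact ⟨"E2", h, by decide⟩
          · exact ⟨"E3", h, by decide⟩
        · rintro ⟨x, hx, hm⟩
          simp only [List.mem_cons, List.not_mem_nil, or_false] at hm
          rcases hm with rfl | rfl
          · exact Or.inl hx
          · exact Or.inr hx
      have h2 : (PySem.Set.len (PySem.Set.diff (PySem.Set.ofList L) (PySem.Set.ofList ["E2", "E3"])) > 0)
          ↔ (L.any (fun x => !PySem.Set.contains (PySem.Set.ofList ["E2", "E3"]) x) = true) := by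
        rw [len_diff_pos_iff]
        simp [List.any_eq_true, PySem.Set.contains, List.contains_eq_mem]
      rw [h1]
      cases hA : L.any (fun x => PySem.Set.contains (PySem.Set.ofList ["E2", "E3"]) x) <;>
        cases hO : L.any (fun x => !PySem.Set.contains (PySem.Set.ofList ["E2", "E3"]) x) <;>
        simp only [h2, hA, hO] <;> norm_num
  · by_cases hL : L = []
    · simp [hL]
    · rw [if_pos ((len_ofList_ne_zero_iff L).mpr hL)]
      have h1 : PySem.Set.contains (PySem.Set.ofList L) "E2"
          = L.any (fun x => PySem.Set.contains (PySem.Set.ofList ["E2"]) x) := by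
        rw [contains_ofList_eq]
        apply Bool.eq_iff_iff.mpr
        simp only [List.contains_eq_mem, decide_eq_true_eq, List.any_eq_true,
          PySem.Set.contains, PySem.Set.mem_ofList]
        constructor
        · intro h
          exact ⟨"E2", h, by decide⟩
        · rintro ⟨x, hx, hm⟩
          simp only [List.mem_cons, List.not_mem_nil, or_false] at hm
          rcases hm with rfl
          exact hx
      have h2 : (PySem.Set.len (PySem.Set.diff (PySem.Set.ofList L) (PySem.Set.ofList ["E2"])) > 0)
          ↔ (L.any (fun x => !PySem.Set.contains (PySem.Set.ofList ["E2"]) x) = true) := by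
        rw [len_diff_pos_iff]
        simp [List.any_eq_true, PySem.Set.contains, List.contains_eq_mem]
      rw [h1]
      cases hA : L.any (fun x => PySem.Set.contains (PySem.Set.ofList ["E2"]) x) <;>
        cases hO : L.any (fun x => !PySem.Set.contains (PySem.Set.ofList ["E2"]) x) <;>
        simp only [h2, hA, hO] <;> norm_num
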